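-- pv_equiv track=rewrite | github.com/sjokic/GenomeIndexerAligner | compression.py | binary_compression
-- ===== SOURCE A (Python) =====
-- code_dict = {"A" : "000",
--              "C" : "001",
--              "G" : "010",
--              "N" : "011",
--              "T" : "100",
--              "$" : "101"}
--
-- def binary(s):
--     '''
--     Given a binary sequence, computes the corresponding decimal number
--     :param s: binary sequence (string of 0s and 1s)
--     :return: the decimal number (int)
--     '''
--     c = 1
--     r = 0
--     for i in range(len(s)-1,-1,-1):
--         if s[i] == "1":
--             r += c
--         c *= 2
--     return r
--
-- def binary_compression(seq):
--     '''
--     Compresses a genome sequence using binary sequences and ASCII characters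
--     :param seq: genome sequence to compress (string)
--     :return: compressed sequence (string)
--     '''
--     n = len(seq)
--     i = 0
--     current = ""
--     res = ""
--     while(i<n):
--         char = seq[i]
--         current += code_dict[char]
--         if len(current)>=7:
--             code = binary(current[0:7])
--             current = current[7:]
--             res += chr(code)
--         i+=1
--     res = current + '\n' + res
--     return res
-- ===== SOURCE B (Python) =====
-- code_dict = {"A" : "000",
--              "C" : "001",
--              "G" : "010",
--              "N" : "011",
--              "T" : "100",
--              "$" : "101"}
--
-- def binary_compression(seq):
--     bits = ''.join(code_dict[c] for c in seq)
--     full = 7 * (len(bits) // 7)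
--     res = ''.join(chr(int(bits[i:i+7], 2)) for i in range(0, full, 7))
--     return bits[full:] + '\n' + res
-- ===== Notes on version B (the rewrite author's own statement) =====
-- stated objective: simpler
-- what changed: B precomputes the whole 3-bit code string in one pass and then chunks it at fixed 7-bit strides with int(s,2), replacing A's interleaved streaming buffer with per-character slicing and a hand-rolled binary-to-decimal loop.
import Mathlib
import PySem

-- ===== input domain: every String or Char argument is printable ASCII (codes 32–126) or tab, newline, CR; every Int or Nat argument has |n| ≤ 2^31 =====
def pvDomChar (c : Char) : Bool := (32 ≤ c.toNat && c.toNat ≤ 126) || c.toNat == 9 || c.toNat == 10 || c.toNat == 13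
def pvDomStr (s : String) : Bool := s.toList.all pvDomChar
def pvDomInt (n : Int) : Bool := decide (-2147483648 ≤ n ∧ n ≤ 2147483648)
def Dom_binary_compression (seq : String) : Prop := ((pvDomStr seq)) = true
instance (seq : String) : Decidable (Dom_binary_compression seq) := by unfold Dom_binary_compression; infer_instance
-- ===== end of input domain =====

-- B replaces A's interleaved variable-width streaming buffer with a precomputed bit
-- string chunked at fixed 7-bit strides (objective: simpler).

-- ===== PORT A =====
-- code_dict[c]; on any other char Python raises KeyError — those inputs are excluded
-- by Pre_binary_compression, the [] default is never reached inside Pre_.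
def pvCode (c : Char) : List Char :=
  if c = 'A' then ['0','0','0']
  else if c = 'C' then ['0','0','1']
  else if c = 'G' then ['0','1','0']
  else if c = 'N' then ['0','1','1']
  else if c = 'T' then ['1','0','0']
  else if c = '$' then ['1','0','1']
  else []

-- binary(s): the loop 'for i in range(len(s)-1,-1,-1)' processes s right to left,
-- carrying c (power of two) and r (accumulator); ported as a fold over s.reverse.
def pvBinAux : List Char → Int → Int → Int
  | [], _, r => r
  | ch :: t, c, r => pvBinAux t (c * 2) (if ch = '1' then r + c else r)

def pvBinary (s : List Char) : Int := pvBinAux s.reverse 1 0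

def pvChr (n : Int) : Char := Char.ofNat n.toNat  -- chr(n) for 0 ≤ n < 128, the only values reached

-- the while loop: state (current, res); emit a char whenever current holds ≥ 7 bits
def pvLoopA : List Char → List Char → List Char → List Char
  | [], cur, res => cur ++ '\n' :: res
  | c :: cs, cur, res =>
    let cur' := cur ++ pvCode c
    if 7 ≤ cur'.length then
      pvLoopA cs (cur'.drop 7) (res ++ [pvChr (pvBinary (cur'.take 7))])
    else
      pvLoopA cs cur' res

def binary_compression (seq : String) : String :=
  String.mk (pvLoopA seq.toList [] [])

-- ===== PORT B =====
-- int(s, 2) on a string of '0'/'1' (the only strings it is applied to)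
-- B's own copy of the same code_dict (Source B has its own module constant)
def pvCodeB (c : Char) : List Char :=
  if c = 'A' then ['0','0','0']
  else if c = 'C' then ['0','0','1']
  else if c = 'G' then ['0','1','0']
  else if c = 'N' then ['0','1','1']
  else if c = 'T' then ['1','0','0']
  else if c = '$' then ['1','0','1']
  else []  -- KeyError in Python; unreachable inside Pre_

def pvChrB (n : Int) : Char := Char.ofNat n.toNat  -- chr(n), values reached are 0..127

def pvVal2 (s : List Char) : Int :=
  s.foldl (fun a ch => 2 * a + (if ch = '1' then 1 else 0)) 0

-- ''.join(chr(int(bits[i:i+7],2)) for i in range(0, full, 7)): consume 7 bits per step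
def pvChunks (bits : List Char) : List Char :=
  if h : 7 ≤ bits.length then
    pvChrB (pvVal2 (bits.take 7)) :: pvChunks (bits.drop 7)
  else []
termination_by bits.length
decreasing_by simp [List.length_drop]; omega

def binary_compression_alt (seq : String) : String :=
  let bits := seq.toList.flatMap pvCodeB
  let full := 7 * (bits.length / 7)
  String.mk (bits.drop full ++ '\n' :: pvChunks bits)

-- ===== PRECONDITION & SPEC =====
-- Pre_ excludes exactly the inputs containing a character outside code_dict, on which
-- Python A raises KeyError (B raises the same KeyError there).
def Pre_binary_compression (seq : String) : Prop :=
  (seq.toList.all fun c => c == 'A' || c == 'C' || c == 'G' || c == 'N' || c == 'T' || c == '$') = true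
instance (seq : String) : Decidable (Pre_binary_compression seq) := by
  unfold Pre_binary_compression; infer_instance

def pvWitness_binary_compression : String := "ACGNT$AC"

def Spec_binary_compression (seq : String) (out : String) : Prop := out = binary_compression_alt seq
instance (seq : String) (out : String) : Decidable (Spec_binary_compression seq out) := by unfold Spec_binary_compression; infer_instance

-- ===== CLAIM (what is proved, stated in full; the proofs are below) =====
def Claim_equal_binary_compression : Prop := ∀ (seq : String), Dom_binary_compression seq → Pre_binary_compression seq → Spec_binary_compression seq (binary_compression seq)

-- ===== LEMMAS AND PROOFS =====

theorem pvVal2_append_one (ys : List Char) (x : Char) :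
    pvVal2 (ys ++ [x]) = 2 * pvVal2 ys + (if x = '1' then 1 else 0) := by
  simp [pvVal2, List.foldl_append]

theorem pvBinAux_eq (m : List Char) : ∀ c r : Int,
    pvBinAux m c r = r + c * pvVal2 m.reverse := by
  induction m with
  | nil => intro c r; simp [pvBinAux, pvVal2]
  | cons x t ih =>
      intro c r
      simp only [pvBinAux, ih, List.reverse_cons, pvVal2_append_one]
      split <;> ring

theorem pvBinary_eq (s : List Char) : pvBinary s = pvVal2 s := by
  simp [pvBinary, pvBinAux_eq]

theorem pvChr_binary_eq (s : List Char) : pvChr (pvBinary s) = pvChrB (pvVal2 s) := by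
  simp [pvChr, pvChrB, pvBinary_eq]

theorem pvCodeB_eq : pvCodeB = pvCode := rfl

theorem pvCode_length (c : Char) : (pvCode c).length = 0 ∨ (pvCode c).length = 3 := by
  unfold pvCode; split_ifs <;> simp

theorem pvChunks_step (bits : List Char) (h : 7 ≤ bits.length) :
    pvChunks bits = pvChrB (pvVal2 (bits.take 7)) :: pvChunks (bits.drop 7) := by
  rw [pvChunks]; simp [h]

theorem pvChunks_short (bits : List Char) (h : bits.length < 7) :
    pvChunks bits = [] := by
  rw [pvChunks]; simp; omega

theorem pvLoopA_eq (cs : List Char) : ∀ (cur res : List Char), cur.length < 7 →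
    pvLoopA cs cur res =
      (cur ++ cs.flatMap pvCode).drop
          (7 * ((cur ++ cs.flatMap pvCode).length / 7))
        ++ '\n' :: (res ++ pvChunks (cur ++ cs.flatMap pvCode)) := by
  induction cs with
  | nil =>
      intro cur res h
      have h0 : cur.length / 7 = 0 := by omega
      simp [pvLoopA, pvChunks_short cur h, h0]
  | cons c cs ih =>
      intro cur res h
      simp only [pvLoopA, List.flatMap_cons]
      have hlen : (cur ++ pvCode c).length ≤ 9 := by
        rcases pvCode_length c with h3 | h3 <;> simp [List.length_append, h3] <;> omega
      by_cases h7 : 7 ≤ (cur ++ pvCode c).length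
      · simp only [h7, if_true]
        rw [ih _ _ (by simp only [List.length_drop]; omega)]
        set cur' : List Char := cur ++ pvCode c with hcur'
        have hassoc : cur ++ (pvCode c ++ cs.flatMap pvCode) = cur' ++ cs.flatMap pvCode := by
          simp [hcur', List.append_assoc]
        rw [hassoc]
        have htake : (cur' ++ cs.flatMap pvCode).take 7 = cur'.take 7 :=
          List.take_append_of_le_length h7
        have hdrop : (cur' ++ cs.flatMap pvCode).drop 7 = cur'.drop 7 ++ cs.flatMap pvCode :=
          List.drop_append_of_le_length h7
        have hL : (cur' ++ cs.flatMap pvCode).length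
            = (cur'.drop 7 ++ cs.flatMap pvCode).length + 7 := by
          simp [List.length_append, List.length_drop]; omega
        have hdiv : 7 * ((cur' ++ cs.flatMap pvCode).length / 7)
            = 7 * ((cur'.drop 7 ++ cs.flatMap pvCode).length / 7) + 7 := by
          rw [hL]; omega
        have h7' : 7 ≤ (cur' ++ cs.flatMap pvCode).length := by
          simp [List.length_append]; omega
        rw [pvChunks_step _ h7', htake, hdrop, hdiv]
        rw [pvChr_binary_eq]
        have : (cur' ++ cs.flatMap pvCode).drop
              (7 * ((cur'.drop 7 ++ cs.flatMap pvCode).length / 7) + 7)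
            = (cur'.drop 7 ++ cs.flatMap pvCode).drop
              (7 * ((cur'.drop 7 ++ cs.flatMap pvCode).length / 7)) := by
          rw [Nat.add_comm, ← List.drop_drop, hdrop]
        rw [this]
        simp [List.append_assoc]
      · simp only [h7, if_false]
        rw [ih _ _ (by omega)]
        simp [List.append_assoc]

-- ===== VERDICT (by name: the statement is the Claim_ definition above) =====
theorem binary_compression_spec : Claim_equal_binary_compression := by
  intro seq _ _
  unfold Spec_binary_compression binary_compression binary_compression_alt
  rw [pvCodeB_eq, pvLoopA_eq seq.toList [] [] (by simp)]
  simp
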